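-- pv_equiv track=rewrite | github.com/Chiheb-Edine-Zoghlemi/TIC_TAC_TOE | player.py | wins_by_colunm
-- ===== SOURCE A (Python) =====
-- def wins_by_colunm(dimension):
--     moves=[]
--     for i in range(1,dimension+1) :
--         combo=[]
--         for j in range(i,dimension**2+1,dimension) :
--             combo.append(j)
--         moves.append(combo)
--     return  moves
-- ===== SOURCE B (Python) =====
-- def wins_by_colunm(dimension):
--     # Transpose the row-major grid: row r is range(r*dimension+1, (r+1)*dimension+1),
--     # and zip(*rows) yields the columns, i.e. the column winning combinations.
--     rows = (range(r * dimension + 1, (r + 1) * dimension + 1) for r in range(dimension))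
--     return [list(col) for col in zip(*rows)]
-- ===== Notes on version B (the rewrite author's own statement) =====
-- stated objective: alternative
-- what changed: A builds each column by appending elements of a stride-`dimension` range; B builds the row-major grid (consecutive ranges) and transposes it with zip(*rows).
import Mathlib
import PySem

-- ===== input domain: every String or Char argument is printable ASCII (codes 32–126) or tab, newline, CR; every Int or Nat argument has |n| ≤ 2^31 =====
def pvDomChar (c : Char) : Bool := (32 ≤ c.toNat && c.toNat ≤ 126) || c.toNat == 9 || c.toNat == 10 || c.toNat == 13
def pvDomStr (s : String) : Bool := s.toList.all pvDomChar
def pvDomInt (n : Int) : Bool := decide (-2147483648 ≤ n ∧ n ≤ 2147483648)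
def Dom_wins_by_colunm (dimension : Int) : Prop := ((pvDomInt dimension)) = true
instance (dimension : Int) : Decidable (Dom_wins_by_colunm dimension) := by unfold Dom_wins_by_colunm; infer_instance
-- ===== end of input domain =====

-- B builds the row-major grid and transposes it with zip(*rows) instead of A's
-- per-column strided ranges; objective: alternative decomposition, same cost.

-- ===== PORT A =====
def wins_by_colunm (dimension : Int) : List (List Int) :=
  (PySem.List.pyRange 1 (dimension + 1) 1).foldl
    (fun moves i =>
      moves ++ [(PySem.List.pyRange i (dimension ^ 2 + 1) dimension).foldl
                  (fun combo j => combo ++ [j]) []])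
    []

-- ===== PORT B =====
-- one step of zip(*rows): the heads of all rows and the tails, none if some row is empty
def pvHeads : List (List Int) → Option (List Int × List (List Int))
  | [] => some ([], [])
  | [] :: _ => none
  | (x :: xs) :: rest =>
    match pvHeads rest with
    | none => none
    | some (hs, ts) => some (x :: hs, xs :: ts)

def pvZipGo : List (List Int) → Nat → List (List Int)
  | _, 0 => []
  | rows, Nat.succ fuel =>
    match pvHeads rows with
    | none => []
    | some (hs, ts) => hs :: pvZipGo ts fuel

-- zip(*rows): stops at the shortest row; the first row's length bounds the output
def pvZipStar (rows : List (List Int)) : List (List Int) :=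
  match rows with
  | [] => []
  | r0 :: _ => pvZipGo rows r0.length

def wins_by_colunm_alt (dimension : Int) : List (List Int) :=
  let rows := (PySem.List.pyRange 0 dimension 1).map
    (fun r => PySem.List.pyRange (r * dimension + 1) ((r + 1) * dimension + 1) 1)
  pvZipStar rows

-- ===== PRECONDITION & SPEC =====
def Spec_wins_by_colunm (dimension : Int) (out : List (List Int)) : Prop := out = wins_by_colunm_alt dimension
instance (dimension : Int) (out : List (List Int)) : Decidable (Spec_wins_by_colunm dimension out) := by unfold Spec_wins_by_colunm; infer_instance

-- ===== CLAIM (what is proved, stated in full; the proofs are below) =====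
def Claim_equal_wins_by_colunm : Prop := ∀ (dimension : Int), Dom_wins_by_colunm dimension → Spec_wins_by_colunm dimension (wins_by_colunm dimension)

-- ===== LEMMAS AND PROOFS =====

theorem pvHeads_map_cons {α : Type} (l : List α) (h : α → Int) (t : α → List Int) :
    pvHeads (l.map fun a => h a :: t a) = some (l.map h, l.map t) := by
  induction l with
  | nil => rfl
  | cons a l ih => simp [pvHeads, ih]

theorem pvZipGo_maps {α : Type} (n : Nat) :
    ∀ (fuel : Nat) (fs : List α) (g : α → Nat → Int), fs ≠ [] → n ≤ fuel →
    pvZipGo (fs.map fun a => (List.range n).map (g a)) fuel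
      = (List.range n).map (fun j => fs.map (fun a => g a j)) := by
  induction n with
  | zero =>
    intro fuel fs g hfs _
    obtain ⟨a, fs', rfl⟩ := List.exists_cons_of_ne_nil hfs
    cases fuel <;> simp [pvZipGo, pvHeads]
  | succ n ih =>
    intro fuel fs g hfs hfuel
    obtain ⟨fuel', rfl⟩ : ∃ m, fuel = m + 1 := ⟨fuel - 1, by omega⟩
    have hrange : List.range (n + 1) = 0 :: (List.range n).map Nat.succ :=
      List.range_succ_eq_map
    have hrow : (fun a => (List.range (n+1)).map (g a))
        = fun a => g a 0 :: (List.range n).map (fun k => g a (k + 1)) := by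
      funext a; simp [hrange, List.map_map, Function.comp]
    rw [hrow]
    simp only [pvZipGo, pvHeads_map_cons]
    have := ih fuel' fs (fun a k => g a (k + 1)) hfs (by omega)
    rw [this, hrange]
    simp [List.map_map, Function.comp]

theorem pvZipStar_maps {α : Type} (n : Nat) (fs : List α) (g : α → Nat → Int) (hfs : fs ≠ []) :
    pvZipStar (fs.map fun a => (List.range n).map (g a))
      = (List.range n).map (fun j => fs.map (fun a => g a j)) := by
  obtain ⟨a, fs', rfl⟩ := List.exists_cons_of_ne_nil hfs
  show pvZipGo _ _ = _
  have hlen : ((List.range n).map (g a)).length = n := by simp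
  rw [List.map_cons]
  show pvZipGo ((a :: fs').map fun a => (List.range n).map (g a)) ((List.range n).map (g a)).length = _
  rw [hlen]
  exact pvZipGo_maps n n (a :: fs') g (by simp) le_rfl

theorem wins_by_colunm_A_eq (d : Int) :
    wins_by_colunm d
      = (PySem.List.pyRange 1 (d + 1) 1).map (fun i => PySem.List.pyRange i (d ^ 2 + 1) d) := by
  unfold wins_by_colunm
  rw [PySem.List.foldl_append_singleton_eq_map
    (fun i => (PySem.List.pyRange i (d ^ 2 + 1) d).foldl (fun combo j => combo ++ [j]) [])]
  simp only [PySem.List.foldl_append_singleton_eq_self, List.nil_append]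

theorem pv_count (n j : Nat) (hn : 1 ≤ n) (hj : j < n) :
    (((n : Int) * n + 1 - (1 + (j : Int)) + n - 1) / n) = n := by
  have h1 : ((n : Int) * n + 1 - (1 + (j : Int)) + n - 1)
      = ((n : Int) - 1 - j) + (n : Int) * n := by ring
  rw [h1, Int.add_mul_ediv_left _ _ (by exact_mod_cast Nat.one_le_iff_ne_zero.mp hn)]
  have h2 : ((n : Int) - 1 - j) / n = 0 :=
    Int.ediv_eq_zero_of_lt (by omega) (by omega)
  rw [h2]; ring

theorem pv_col (n j : Nat) (hn : 1 ≤ n) (hj : j < n) :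
    PySem.List.pyRange (1 + (j : Int)) (((n : Int)) ^ 2 + 1) (n : Int)
      = (List.range n).map (fun (r : Nat) => (r : Int) * n + 1 + (j : Int)) := by
  have hpos : (0 : Int) < n := by exact_mod_cast hn
  rw [PySem.List.pyRange_of_pos _ _ hpos]
  have hlt : (1 + (j : Int)) < (n : Int) ^ 2 + 1 := by
    have : (j : Int) < (n : Int) := by exact_mod_cast hj
    nlinarith
  rw [if_pos hlt]
  have : ((n : Int) ^ 2 + 1 - (1 + (j : Int)) + n - 1) = ((n : Int) * n + 1 - (1 + (j : Int)) + n - 1) := by ring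
  rw [this, pv_count n j hn hj]
  simp only [Int.toNat_natCast]
  exact List.map_congr_left (fun k _ => by ring)

-- ===== VERDICT (by name: the statement is the Claim_ definition above) =====
theorem wins_by_colunm_spec : Claim_equal_wins_by_colunm := by
  intro d _hdom
  unfold Spec_wins_by_colunm wins_by_colunm_alt
  by_cases hd : d ≤ 0
  · -- dimension ≤ 0: both sides are []
    rw [wins_by_colunm_A_eq]
    rw [PySem.List.pyRange_one_eq_nil (by omega)]
    rw [PySem.List.pyRange_one_eq_nil (by omega)]
    rfl
  · -- dimension > 0
    have hd' : (0 : Int) < d := by omega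
    obtain ⟨n, rfl⟩ : ∃ n : Nat, d = (n : Int) := ⟨d.toNat, (Int.toNat_of_nonneg hd'.le).symm⟩
    have hn : 1 ≤ n := by exact_mod_cast hd'
    -- left side
    rw [wins_by_colunm_A_eq, PySem.List.pyRange_one]
    have h1 : ((n : Int) + 1 - 1).toNat = n := by omega
    rw [h1]
    -- right side: rows and transpose
    have hrow : ∀ r : Nat, PySem.List.pyRange ((r : Int) * n + 1) (((r : Int) + 1) * n + 1) 1
        = (List.range n).map (fun (k : Nat) => (r : Int) * n + 1 + (k : Int)) := by
      intro r
      rw [PySem.List.pyRange_one]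
      have : (((r : Int) + 1) * n + 1 - ((r : Int) * n + 1)) = (n : Int) := by ring
      rw [this, Int.toNat_natCast]
    have hrows : (PySem.List.pyRange 0 (n : Int) 1).map
        (fun r => PySem.List.pyRange (r * n + 1) ((r + 1) * n + 1) 1)
        = (List.range n).map (fun (r : Nat) => (List.range n).map (fun (k : Nat) => (r : Int) * n + 1 + (k : Int))) := by
      rw [PySem.List.pyRange_zero_natCast, List.map_map]
      exact List.map_congr_left (fun r _ => by simpa using hrow r)
    rw [hrows, pvZipStar_maps n (List.range n) (fun (r : Nat) (k : Nat) => (r : Int) * n + 1 + (k : Int))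
        (by rw [Ne, List.range_eq_nil]; omega)]
    rw [List.map_map]
    exact List.map_congr_left (fun j hj => by
      simpa [Function.comp] using pv_col n j hn (List.mem_range.mp hj))
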